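-- pv_equiv track=rewrite | github.com/nicolemhfarley/short-challenges | count_isograms.py | count_isograms
-- ===== SOURCE A (Python) =====
-- def count_isograms(list_of_words):
--     '''counts number of isograms in a list of strings.
--     Input:list_of_words: list of strings
--     Returns: count of isograms as an int
--     '''
--     counter = 0
--     for word in list_of_words:
--         letter_list = []
--         for letter in word:
--             if letter in letter_list:
--                 continue
--             if letter not in letter_list:
--                 letter_list.append(letter)
--         if len(letter_list) == len(word):
--             counter += 1
--     return counter
-- ===== SOURCE B (Python) =====
-- def count_isograms(list_of_words):
--     '''counts number of isograms in a list of strings.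
--     Sort each word's letters so equal letters become adjacent,
--     then count words whose sorted letters have no adjacent pair equal.'''
--     counter = 0
--     for word in list_of_words:
--         s = sorted(word)
--         if all(a != b for a, b in zip(s, s[1:])):
--             counter += 1
--     return counter
-- ===== Notes on version B (the rewrite author's own statement) =====
-- stated objective: alternative
-- what changed: Replaces the seen-list membership scan (quadratic per word) with sort-then-adjacent-scan: sorted(word) clusters equal letters, so one pass over adjacent pairs decides the isogram test.
import Mathlib
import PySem

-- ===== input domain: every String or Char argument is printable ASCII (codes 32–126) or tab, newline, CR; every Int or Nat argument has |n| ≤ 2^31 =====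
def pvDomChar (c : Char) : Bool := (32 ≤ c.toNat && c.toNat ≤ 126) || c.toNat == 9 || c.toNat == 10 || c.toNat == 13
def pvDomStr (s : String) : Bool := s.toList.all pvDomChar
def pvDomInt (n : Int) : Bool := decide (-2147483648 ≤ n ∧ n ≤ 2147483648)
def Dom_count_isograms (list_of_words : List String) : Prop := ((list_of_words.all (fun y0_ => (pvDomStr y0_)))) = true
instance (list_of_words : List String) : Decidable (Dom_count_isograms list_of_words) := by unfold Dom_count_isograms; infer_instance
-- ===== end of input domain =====

-- B replaces A's per-word seen-list membership scan by sort-then-adjacent-scan (alternative decomposition, same result).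


-- ===== PORT A =====
def count_isograms (list_of_words : List String) : Int :=
  list_of_words.foldl (fun counter word =>
    let letter_list : List Char :=
      word.toList.foldl (fun acc letter =>
        if letter ∈ acc then acc
        else if letter ∉ acc then acc ++ [letter] else acc) []
    if letter_list.length = word.toList.length then counter + 1 else counter) 0

-- ===== PORT B =====
def count_isograms_alt (list_of_words : List String) : Int :=
  list_of_words.foldl (fun counter word =>
    let s := PySem.List.sorted word.toList (fun x => x) false
    if (s.zip s.tail).all (fun p => decide (p.1 ≠ p.2)) then counter + 1 else counter) 0

-- ===== PRECONDITION & SPEC =====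
def Spec_count_isograms (list_of_words : List String) (out : Int) : Prop := out = count_isograms_alt list_of_words
instance (list_of_words : List String) (out : Int) : Decidable (Spec_count_isograms list_of_words out) := by unfold Spec_count_isograms; infer_instance

-- ===== CLAIM (what is proved, stated in full; the proofs are below) =====
def Claim_equal_count_isograms : Prop := ∀ (list_of_words : List String), Dom_count_isograms list_of_words → Spec_count_isograms list_of_words (count_isograms list_of_words)

-- ===== LEMMAS AND PROOFS =====

-- A's inner loop can only add one element per letter
theorem pv_dedup_le (w : List Char) : ∀ (acc : List Char),
    (w.foldl (fun acc letter =>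
        if letter ∈ acc then acc
        else if letter ∉ acc then acc ++ [letter] else acc) acc).length ≤ acc.length + w.length := by
  induction w with
  | nil => intro acc; simp
  | cons l t ih =>
    intro acc
    rw [List.foldl_cons]
    by_cases h : l ∈ acc
    · have hstep : (if l ∈ acc then acc
          else if l ∉ acc then acc ++ [l] else acc) = acc := by simp [h]
      rw [hstep, List.length_cons]
      have := ih acc; omega
    · have hstep : (if l ∈ acc then acc
          else if l ∉ acc then acc ++ [l] else acc) = acc ++ [l] := by simp [h]
      rw [hstep, List.length_cons]
      have := ih (acc ++ [l])
      simp only [List.length_append, List.length_cons, List.length_nil] at this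
      omega

-- A's inner loop reaches the full length exactly when w is duplicate-free and disjoint from acc
theorem pv_dedup_len (w : List Char) : ∀ (acc : List Char),
    ((w.foldl (fun acc letter =>
        if letter ∈ acc then acc
        else if letter ∉ acc then acc ++ [letter] else acc) acc).length = acc.length + w.length
      ↔ w.Nodup ∧ ∀ x ∈ w, x ∉ acc) := by
  induction w with
  | nil => intro acc; simp
  | cons l t ih =>
    intro acc
    rw [List.foldl_cons]
    by_cases h : l ∈ acc
    · have hstep : (if l ∈ acc then acc
          else if l ∉ acc then acc ++ [l] else acc) = acc := by simp [h]
      rw [hstep, List.length_cons]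
      constructor
      · intro hlen
        have := pv_dedup_le t acc
        omega
      · rintro ⟨-, hd⟩
        exact absurd h (hd l (by simp))
    · have hstep : (if l ∈ acc then acc
          else if l ∉ acc then acc ++ [l] else acc) = acc ++ [l] := by simp [h]
      rw [hstep]
      have hlen : acc.length + (l :: t).length = (acc ++ [l]).length + t.length := by
        simp only [List.length_append, List.length_cons, List.length_nil]; omega
      rw [hlen, ih (acc ++ [l])]
      constructor
      · rintro ⟨hnd, hdisj⟩
        refine ⟨List.nodup_cons.mpr ⟨fun hl => hdisj l hl
            (List.mem_append.mpr (Or.inr (List.mem_singleton.mpr rfl))), hnd⟩, ?_⟩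
        intro x hx
        rcases List.mem_cons.mp hx with rfl | hx'
        · exact h
        · exact fun hxa => hdisj x hx' (List.mem_append.mpr (Or.inl hxa))
      · rintro ⟨hnd, hdisj⟩
        rcases List.nodup_cons.mp hnd with ⟨hlnt, hnd'⟩
        refine ⟨hnd', ?_⟩
        intro x hx hmem
        rcases List.mem_append.mp hmem with hxa | hxl
        · exact hdisj x (List.mem_cons.mpr (Or.inr hx)) hxa
        · exact hlnt (List.mem_singleton.mp hxl ▸ hx)

-- adjacent-distinct scan over a ≤-sorted list decides Nodup
theorem pv_adj : ∀ (s : List Char), s.Pairwise (· ≤ ·) →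
    (((s.zip s.tail).all (fun p => decide (p.1 ≠ p.2)) = true) ↔ s.Nodup) := by
  intro s
  induction s with
  | nil => simp
  | cons a t ih =>
    intro hs
    cases t with
    | nil => simp
    | cons b u =>
      rcases List.pairwise_cons.mp hs with ⟨hle, ht⟩
      have hab : a ≤ b := hle b (by simp)
      have hbu : ∀ x ∈ u, b ≤ x := fun x hx => (List.pairwise_cons.mp ht).1 x hx
      simp only [List.tail_cons] at ih ⊢
      rw [List.zip_cons_cons, List.all_cons, Bool.and_eq_true, decide_eq_true_eq,
        ih ht, List.nodup_cons (a := a)]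
      constructor
      · rintro ⟨hne, hnd⟩
        refine ⟨?_, hnd⟩
        intro hmem
        rcases List.mem_cons.mp hmem with rfl | hx
        · exact hne rfl
        · exact hne (le_antisymm hab (hbu a hx))
      · rintro ⟨hna, hnd⟩
        exact ⟨fun hab' => hna (List.mem_cons.mpr (Or.inl hab')), hnd⟩

-- the two per-word decisions coincide
theorem pv_word (word : String) :
    (if (word.toList.foldl (fun acc letter =>
          if letter ∈ acc then acc
          else if letter ∉ acc then acc ++ [letter] else acc) []).length = word.toList.length
       then true else false)
    = ((PySem.List.sorted word.toList (fun x => x) false).zip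
        (PySem.List.sorted word.toList (fun x => x) false).tail).all (fun p => decide (p.1 ≠ p.2)) := by
  have h1 := pv_dedup_len word.toList []
  simp only [List.length_nil, Nat.zero_add, List.not_mem_nil, not_false_iff, implies_true,
    and_true] at h1
  have hperm : (PySem.List.sorted word.toList (fun x => x) false).Perm word.toList :=
    PySem.List.sorted_perm _ _ _
  have h2 := pv_adj (PySem.List.sorted word.toList (fun x => x) false)
    (PySem.List.sorted_pairwise word.toList (fun x => x))
  rw [hperm.nodup_iff] at h2
  by_cases hc : (word.toList.foldl (fun acc letter =>
      if letter ∈ acc then acc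
      else if letter ∉ acc then acc ++ [letter] else acc) []).length = word.toList.length
  · rw [if_pos hc]
    exact (h2.mpr (h1.mp hc)).symm
  · rw [if_neg hc]
    cases hb : ((PySem.List.sorted word.toList (fun x => x) false).zip
        (PySem.List.sorted word.toList (fun x => x) false).tail).all (fun p => decide (p.1 ≠ p.2))
    · rfl
    · exact absurd (h1.mpr (h2.mp hb)) hc

-- ===== VERDICT (by name: the statement is the Claim_ definition above) =====
theorem count_isograms_spec : Claim_equal_count_isograms := by
  intro lw _
  unfold Spec_count_isograms count_isograms count_isograms_alt
  congr 1
  funext counter word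
  dsimp only
  rw [← pv_word word]
  by_cases hc : (word.toList.foldl (fun acc letter =>
      if letter ∈ acc then acc
      else if letter ∉ acc then acc ++ [letter] else acc) []).length = word.toList.length
  · simp
  · simp
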